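-- pv_equiv track=rewrite | github.com/mfurga-cs/asd | inne/zawieranie_przedzialow.py | intersection_brute
-- ===== SOURCE A (Python) =====
-- def intersection_brute(I):
--   n = len(I)
--
--   to_remove = []
--
--   for i in range(n):
--     for j in range(n):
--       if i == j:
--         continue
--       if I[i][0] <= I[j][0] and I[i][1] >= I[j][1]:
--         to_remove.append(i)
--
--   to_remove = sorted(list(set(to_remove)))
--   return to_remove
-- ===== SOURCE B (Python) =====
-- def intersection_brute(I):
--   # Sort indices by (start asc, end desc); scanning that order from the right while
--   # keeping the minimum end seen, an interval contains another iff that suffix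
--   # minimum fits inside it, or the interval occurs at least twice.
--   n = len(I)
--   cnt = {}
--   for iv in I:
--     cnt[iv] = cnt.get(iv, 0) + 1
--   order = sorted(range(n), key=lambda i: (I[i][0], -I[i][1]))
--   res = []
--   m = None  # min end among the intervals already scanned (all start no earlier)
--   for i in reversed(order):
--     s, e = I[i]
--     if cnt[(s, e)] >= 2 or (m is not None and m <= e):
--       res.append(i)
--     if m is None or e < m:
--       m = e
--   return sorted(res)
-- ===== Notes on version B (the rewrite author's own statement) =====
-- stated objective: faster
-- what changed: Replaces A's all-pairs O(n^2) containment scan by sorting the indices by (start asc, end desc) and scanning that order right-to-left with a running minimum of interval ends (an index qualifies iff the suffix minimum end fits inside it) plus a dict counting exact duplicates.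
import Mathlib
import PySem

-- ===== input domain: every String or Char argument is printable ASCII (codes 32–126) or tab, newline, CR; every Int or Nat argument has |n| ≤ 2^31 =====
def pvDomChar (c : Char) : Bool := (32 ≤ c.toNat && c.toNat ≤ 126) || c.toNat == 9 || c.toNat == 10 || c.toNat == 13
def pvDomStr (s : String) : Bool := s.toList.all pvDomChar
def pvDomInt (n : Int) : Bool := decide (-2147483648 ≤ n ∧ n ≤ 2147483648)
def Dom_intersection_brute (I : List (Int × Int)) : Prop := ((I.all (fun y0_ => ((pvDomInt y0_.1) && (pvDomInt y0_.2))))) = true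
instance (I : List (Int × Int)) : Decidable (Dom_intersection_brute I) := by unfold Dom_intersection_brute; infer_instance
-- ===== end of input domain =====

-- B replaces A's all-pairs double loop by a sort of the indices by (start asc, end desc)
-- plus a right-to-left suffix-minimum-of-end scan and a duplicate count (objective: faster).

-- ===== PORT A =====
def intersection_brute (I : List (Int × Int)) : List Int :=
  let n : Int := I.length
  let to_remove : List Int :=
    (PySem.List.pyRange 0 n 1).foldl (fun acc i =>
      (PySem.List.pyRange 0 n 1).foldl (fun acc2 j =>
        if i == j then acc2
        else if (PySem.List.pyGetD I i (0, 0)).1 ≤ (PySem.List.pyGetD I j (0, 0)).1 ∧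
                (PySem.List.pyGetD I i (0, 0)).2 ≥ (PySem.List.pyGetD I j (0, 0)).2
          then acc2 ++ [i] else acc2) acc) []
  PySem.List.sorted (PySem.Set.ofList to_remove) (fun x => x) false

-- ===== PORT B =====
-- the 'cnt' dict loop of Source B
def pvCnt (I : List (Int × Int)) : PySem.Dict (Int × Int) Int :=
  I.foldl (fun d iv => d.insert iv (d.getD iv 0 + 1)) PySem.Dict.empty

-- sorted(range(n), key=lambda i: (I[i][0], -I[i][1]))
def pvOrder (I : List (Int × Int)) : List Int :=
  PySem.List.sorted2 (PySem.List.pyRange 0 (I.length : Int) 1)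
    (fun i => (PySem.List.pyGetD I i (0, 0)).1)
    (fun i => -(PySem.List.pyGetD I i (0, 0)).2)

-- the body of Source B's 'for i in reversed(order)' loop; state = (res, m)
def pvStep (I : List (Int × Int)) (st : List Int × Option Int) (i : Int) :
    List Int × Option Int :=
  let se := PySem.List.pyGetD I i ((0 : Int), (0 : Int))
  let keep : Bool := decide ((2 : Int) ≤ (pvCnt I).getD se 0) ||
    (match st.2 with | none => false | some v => decide (v ≤ se.2))
  let m' : Option Int := match st.2 with
    | none => some se.2
    | some v => if se.2 < v then some se.2 else some v
  (if keep then st.1 ++ [i] else st.1, m')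

def intersection_brute_alt (I : List (Int × Int)) : List Int :=
  let st := (pvOrder I).reverse.foldl (pvStep I) (([] : List Int), (none : Option Int))
  PySem.List.sorted st.1 (fun x => x) false

-- ===== PRECONDITION & SPEC =====
def Spec_intersection_brute (I : List (Int × Int)) (out : List Int) : Prop := out = intersection_brute_alt I
instance (I : List (Int × Int)) (out : List Int) : Decidable (Spec_intersection_brute I out) := by unfold Spec_intersection_brute; infer_instance

-- ===== CLAIM (what is proved, stated in full; the proofs are below) =====
def Claim_equal_intersection_brute : Prop := ∀ (I : List (Int × Int)), Dom_intersection_brute I → Spec_intersection_brute I (intersection_brute I)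

-- ===== LEMMAS AND PROOFS =====

-- pvR I: the multiset of indices A appends to to_remove, as a flatMap
def pvR (I : List (Int × Int)) : List Int :=
  (PySem.List.pyRange 0 (I.length : Int) 1).flatMap (fun i =>
    ((PySem.List.pyRange 0 (I.length : Int) 1).filter (fun j =>
        decide (¬ i = j ∧
          (PySem.List.pyGetD I i (0, 0)).1 ≤ (PySem.List.pyGetD I j (0, 0)).1 ∧
          (PySem.List.pyGetD I i (0, 0)).2 ≥ (PySem.List.pyGetD I j (0, 0)).2))).map (fun _ => i))

lemma brute_eq (I : List (Int × Int)) :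
    intersection_brute I =
      PySem.List.sorted (PySem.Set.ofList (pvR I)) (fun x => x) false := by
  have key : (PySem.List.pyRange 0 (I.length : Int) 1).foldl (fun acc i =>
      (PySem.List.pyRange 0 (I.length : Int) 1).foldl (fun acc2 j =>
        if i == j then acc2
        else if (PySem.List.pyGetD I i (0, 0)).1 ≤ (PySem.List.pyGetD I j (0, 0)).1 ∧
                (PySem.List.pyGetD I i (0, 0)).2 ≥ (PySem.List.pyGetD I j (0, 0)).2
          then acc2 ++ [i] else acc2) acc) ([] : List Int) = pvR I := by
    have hinner : ∀ i acc,
        (PySem.List.pyRange 0 (I.length : Int) 1).foldl (fun acc2 j =>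
          if i == j then acc2
          else if (PySem.List.pyGetD I i (0, 0)).1 ≤ (PySem.List.pyGetD I j (0, 0)).1 ∧
                  (PySem.List.pyGetD I i (0, 0)).2 ≥ (PySem.List.pyGetD I j (0, 0)).2
            then acc2 ++ [i] else acc2) acc
        = acc ++ ((PySem.List.pyRange 0 (I.length : Int) 1).filter (fun j =>
            decide (¬ i = j ∧
              (PySem.List.pyGetD I i (0, 0)).1 ≤ (PySem.List.pyGetD I j (0, 0)).1 ∧
              (PySem.List.pyGetD I i (0, 0)).2 ≥ (PySem.List.pyGetD I j (0, 0)).2))).map (fun _ => i) := by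
      intro i acc
      rw [← PySem.List.foldl_append_ite (p := fun j =>
        ¬ i = j ∧
          (PySem.List.pyGetD I i (0, 0)).1 ≤ (PySem.List.pyGetD I j (0, 0)).1 ∧
          (PySem.List.pyGetD I i (0, 0)).2 ≥ (PySem.List.pyGetD I j (0, 0)).2) (f := fun _ => i)]
      apply PySem.List.foldl_congr_mem
      intro acc2 j _
      by_cases hij : i = j
      · simp [hij]
      · simp only [hij, beq_iff_eq, not_false_iff, true_and]
        split_ifs <;> simp_all
    have houter : (PySem.List.pyRange 0 (I.length : Int) 1).foldl (fun acc i =>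
        (PySem.List.pyRange 0 (I.length : Int) 1).foldl (fun acc2 j =>
          if i == j then acc2
          else if (PySem.List.pyGetD I i (0, 0)).1 ≤ (PySem.List.pyGetD I j (0, 0)).1 ∧
                  (PySem.List.pyGetD I i (0, 0)).2 ≥ (PySem.List.pyGetD I j (0, 0)).2
            then acc2 ++ [i] else acc2) acc) ([] : List Int)
        = (PySem.List.pyRange 0 (I.length : Int) 1).foldl (fun acc i =>
            acc ++ ((PySem.List.pyRange 0 (I.length : Int) 1).filter (fun j =>
              decide (¬ i = j ∧
                (PySem.List.pyGetD I i (0, 0)).1 ≤ (PySem.List.pyGetD I j (0, 0)).1 ∧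
                (PySem.List.pyGetD I i (0, 0)).2 ≥ (PySem.List.pyGetD I j (0, 0)).2))).map
              (fun _ => i)) [] := by
      apply PySem.List.foldl_congr_mem
      intro acc i _
      exact hinner i acc
    rw [houter, PySem.List.foldl_append_eq_flatMap]
    simp [pvR]
  simp only [intersection_brute]
  rw [key]

lemma mem_pvR (I : List (Int × Int)) (x : Int) :
    x ∈ pvR I ↔ x ∈ PySem.List.pyRange 0 (I.length : Int) 1 ∧
      ∃ j ∈ PySem.List.pyRange 0 (I.length : Int) 1, j ≠ x ∧
        (PySem.List.pyGetD I x (0, 0)).1 ≤ (PySem.List.pyGetD I j (0, 0)).1 ∧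
        (PySem.List.pyGetD I x (0, 0)).2 ≥ (PySem.List.pyGetD I j (0, 0)).2 := by
  unfold pvR
  simp only [List.mem_flatMap, List.mem_map, List.mem_filter, decide_eq_true_eq]
  constructor
  · rintro ⟨i, hi, ⟨j, ⟨hj, hne, hc⟩, rfl⟩⟩
    exact ⟨hi, j, hj, fun h => hne h.symm, hc⟩
  · rintro ⟨hx, j, hj, hne, hc⟩
    exact ⟨x, hx, ⟨j, ⟨hj, fun h => hne h.symm, hc⟩, rfl⟩⟩

-- a ∈ l with p a: a duplicate-free l has a second p-element iff p holds at least twice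
lemma two_le_countP_iff {l : List Int} (hnd : l.Nodup) {a : Int} (ha : a ∈ l)
    {p : Int → Bool} (hpa : p a = true) :
    2 ≤ l.countP p ↔ ∃ b ∈ l, b ≠ a ∧ p b = true := by
  rw [List.countP_eq_length_filter]
  have haf : a ∈ l.filter p := List.mem_filter.mpr ⟨ha, hpa⟩
  have hndf : (l.filter p).Nodup := hnd.filter p
  obtain ⟨s, t, hst⟩ := List.append_of_mem haf
  rw [hst] at hndf
  have hna : a ∉ s ∧ a ∉ t := by
    have h1 := List.disjoint_of_nodup_append hndf
    have h2 := (List.nodup_append.mp hndf).2.1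
    exact ⟨fun h => h1 h List.mem_cons_self, (List.nodup_cons.mp h2).1⟩
  have hlen : (l.filter p).length = s.length + t.length + 1 := by
    rw [hst]; simp only [List.length_append, List.length_cons]; omega
  constructor
  · intro h2
    have hpos : 0 < (s ++ t).length := by
      simp only [List.length_append]; omega
    obtain ⟨b, hb⟩ := List.exists_mem_of_length_pos hpos
    have hbf : b ∈ l.filter p := by
      rw [hst]
      rcases List.mem_append.mp hb with h | h
      · exact List.mem_append.mpr (Or.inl h)
      · exact List.mem_append.mpr (Or.inr (List.mem_cons_of_mem _ h))
    have hba : b ≠ a := by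
      intro h; subst h
      rcases List.mem_append.mp hb with h | h
      · exact hna.1 h
      · exact hna.2 h
    obtain ⟨hbl, hpb⟩ := List.mem_filter.mp hbf
    exact ⟨b, hbl, hba, hpb⟩
  · rintro ⟨b, hbl, hba, hpb⟩
    have hbf : b ∈ l.filter p := List.mem_filter.mpr ⟨hbl, hpb⟩
    have hb' : b ∈ s ++ t := by
      rw [hst] at hbf
      rcases List.mem_append.mp hbf with h | h
      · exact List.mem_append.mpr (Or.inl h)
      · rcases List.mem_cons.mp h with h | h
        · exact absurd h hba
        · exact List.mem_append.mpr (Or.inr h)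
    have : 0 < (s ++ t).length := List.length_pos_of_mem hb'
    simp only [List.length_append] at this
    omega

-- cnt[(s, e)] is the number of occurrences of (s, e) in I
lemma cnt_getD (I : List (Int × Int)) (v : Int × Int) :
    (pvCnt I).getD v 0 = (I.count v : Int) := by
  unfold pvCnt
  rw [PySem.Dict.getD_foldl_insert_add_one]
  simp [PySem.Dict.getD_empty]

-- count of a value in I, as a countP over the index range
lemma count_eq_countP (I : List (Int × Int)) (v : Int × Int) :
    I.count v = (PySem.List.pyRange 0 (I.length : Int) 1).countP
      (fun j => decide (PySem.List.pyGetD I j (0, 0) = v)) := by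
  conv_lhs => rw [← PySem.List.map_pyGetD_pyRange_zero' (xs := I) (d := ((0 : Int), (0 : Int)))]
  rw [List.count_eq_countP, List.countP_map]
  apply List.countP_congr
  intro j _
  simp

-- Source B's sort key, as one lexicographic key
def pvKey (I : List (Int × Int)) (i : Int) : Int ×ₗ Int :=
  toLex ((PySem.List.pyGetD I i (0, 0)).1, -(PySem.List.pyGetD I i (0, 0)).2)

-- sorted2's tuple-key comparator is the lexicographic single-key comparator
lemma pvOrder_eq (I : List (Int × Int)) :
    pvOrder I = PySem.List.sorted (PySem.List.pyRange 0 (I.length : Int) 1) (pvKey I) false := by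
  unfold pvOrder
  simp only [PySem.List.sorted2, PySem.List.sorted, if_neg (by decide : ¬ (false = true))]
  congr 1
  funext acc x
  congr 1
  funext a b
  simp only [pvKey, Prod.Lex.lt_iff, ofLex_toLex]
  by_cases h1 : (PySem.List.pyGetD I a (0, 0)).1 < (PySem.List.pyGetD I b (0, 0)).1 <;>
    by_cases h2 : (PySem.List.pyGetD I b (0, 0)).1 < (PySem.List.pyGetD I a (0, 0)).1 <;>
    by_cases h3 : -(PySem.List.pyGetD I a (0, 0)).2 < -(PySem.List.pyGetD I b (0, 0)).2 <;>
    simp [h1, h2, h3] <;> omega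

lemma pvOrder_perm (I : List (Int × Int)) :
    (pvOrder I).Perm (PySem.List.pyRange 0 (I.length : Int) 1) := by
  unfold pvOrder
  exact PySem.List.sorted2_perm _ _ _ _

lemma pvOrder_nodup (I : List (Int × Int)) : (pvOrder I).Nodup :=
  (pvOrder_perm I).nodup_iff.mpr (PySem.List.nodup_pyRange_one 0 (I.length : Int))

lemma pvOrder_pairwise (I : List (Int × Int)) :
    (pvOrder I).Pairwise (fun a b => pvKey I a ≤ pvKey I b) := by
  rw [pvOrder_eq]
  exact PySem.List.sorted_pairwise _ _

-- the condition under which Source B's scan appends index x whose strict suffix in order is suf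
def pvCond (I : List (Int × Int)) (x : Int) (suf : List Int) : Prop :=
  (2 : Int) ≤ (I.count (PySem.List.pyGetD I x (0, 0)) : Int) ∨
    ∃ j ∈ suf, (PySem.List.pyGetD I j (0, 0)).2 ≤ (PySem.List.pyGetD I x (0, 0)).2

-- full characterisation of Source B's right-to-left scan over a list L of indices
lemma pvLoop (I : List (Int × Int)) (L : List Int) :
    ((L.foldr (fun i st => pvStep I st i) (([] : List Int), (none : Option Int))).2 = none ↔ L = [])
  ∧ (∀ v, (L.foldr (fun i st => pvStep I st i) (([] : List Int), (none : Option Int))).2 = some v →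
      (∃ j ∈ L, (PySem.List.pyGetD I j (0, 0)).2 = v) ∧
      ∀ j ∈ L, v ≤ (PySem.List.pyGetD I j (0, 0)).2)
  ∧ (∀ x, x ∈ (L.foldr (fun i st => pvStep I st i) (([] : List Int), (none : Option Int))).1 ↔
      ∃ pre suf, L = pre ++ x :: suf ∧ pvCond I x suf)
  ∧ (L.foldr (fun i st => pvStep I st i) (([] : List Int), (none : Option Int))).1.Sublist L.reverse := by
  induction L with
  | nil =>
      refine ⟨by simp, by simp, ?_, by simp⟩
      intro x
      simp only [List.foldr_nil, List.not_mem_nil, false_iff]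
      rintro ⟨pre, suf, h, -⟩
      exact absurd h (by simp)
  | cons a L ih =>
      obtain ⟨ih_none, ih_min, ih_mem, ih_sub⟩ := ih
      set st := L.foldr (fun i st => pvStep I st i) (([] : List Int), (none : Option Int)) with hst
      have hfold : (a :: L).foldr (fun i st => pvStep I st i)
          (([] : List Int), (none : Option Int)) = pvStep I st a := by
        simp [List.foldr_cons, hst]
      rw [hfold]
      -- the hit test of the scan is "some later interval's end fits under e_a"
      have hhit : ((match st.2 with
            | none => false
            | some v => decide (v ≤ (PySem.List.pyGetD I a ((0 : Int), (0 : Int))).2)) = true) ↔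
          ∃ j ∈ L, (PySem.List.pyGetD I j (0, 0)).2 ≤ (PySem.List.pyGetD I a (0, 0)).2 := by
        cases hm : st.2 with
        | none =>
            have hL : L = [] := ih_none.mp hm
            subst hL
            simp
        | some v =>
            obtain ⟨⟨j0, hj0, hj0v⟩, hmin⟩ := ih_min v hm
            simp only [decide_eq_true_eq]
            constructor
            · intro hv
              exact ⟨j0, hj0, by rw [hj0v]; exact hv⟩
            · rintro ⟨j, hj, hje⟩
              exact le_trans (hmin j hj) hje
      have hkeep : ((decide ((2 : Int) ≤ (pvCnt I).getD (PySem.List.pyGetD I a ((0 : Int), (0 : Int))) 0) ||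
            (match st.2 with
              | none => false
              | some v => decide (v ≤ (PySem.List.pyGetD I a ((0 : Int), (0 : Int))).2))) = true) ↔
          pvCond I a L := by
        rw [Bool.or_eq_true, hhit, decide_eq_true_eq, pvCond, cnt_getD]
      refine ⟨?_, ?_, ?_, ?_⟩
      · -- m is never None after processing a nonempty list
        simp only [pvStep]
        cases st.2 <;> · simp; try (split <;> simp)
      · -- the new m is the attained minimum end over a :: L
        intro v hv
        simp only [pvStep] at hv
        cases hm : st.2 with
        | none =>
            have hL : L = [] := ih_none.mp hm
            rw [hm] at hv
            simp only at hv
            subst hL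
            cases hv
            exact ⟨⟨a, by simp, rfl⟩, by simp⟩
        | some w =>
            obtain ⟨⟨j0, hj0, hj0v⟩, hmin⟩ := ih_min w hm
            rw [hm] at hv
            simp only at hv
            by_cases hlt : (PySem.List.pyGetD I a ((0 : Int), (0 : Int))).2 < w
            · rw [if_pos hlt] at hv
              cases hv
              refine ⟨⟨a, by simp, rfl⟩, ?_⟩
              intro j hj
              rcases List.mem_cons.mp hj with rfl | hj
              · exact le_rfl
              · exact le_trans (le_of_lt hlt) (hmin j hj)
            · rw [if_neg hlt] at hv
              cases hv
              refine ⟨⟨j0, List.mem_cons_of_mem _ hj0, hj0v⟩, ?_⟩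
              intro j hj
              rcases List.mem_cons.mp hj with rfl | hj
              · omega
              · exact hmin j hj
      · -- membership in res
        intro x
        have hdecomp : (∃ pre suf, a :: L = pre ++ x :: suf ∧ pvCond I x suf) ↔
            ((x = a ∧ pvCond I a L) ∨ ∃ pre suf, L = pre ++ x :: suf ∧ pvCond I x suf) := by
          constructor
          · rintro ⟨pre, suf, hdec, hc⟩
            cases pre with
            | nil =>
                simp only [List.nil_append, List.cons.injEq] at hdec
                exact Or.inl ⟨hdec.1.symm, by rw [hdec.1, hdec.2]; exact hc⟩
            | cons b pre' =>
                simp only [List.cons_append, List.cons.injEq] at hdec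
                exact Or.inr ⟨pre', suf, hdec.2, hc⟩
          · rintro (⟨rfl, hc⟩ | ⟨pre, suf, hdec, hc⟩)
            · exact ⟨[], L, rfl, hc⟩
            · exact ⟨a :: pre, suf, by rw [hdec]; rfl, hc⟩
        rw [hdecomp]
        simp only [pvStep]
        by_cases hk : (decide ((2 : Int) ≤ (pvCnt I).getD (PySem.List.pyGetD I a ((0 : Int), (0 : Int))) 0) ||
            (match st.2 with
              | none => false
              | some v => decide (v ≤ (PySem.List.pyGetD I a ((0 : Int), (0 : Int))).2))) = true
        · rw [if_pos hk]
          simp only [List.mem_append, List.mem_singleton, ih_mem]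
          constructor
          · rintro (h | rfl)
            · exact Or.inr h
            · exact Or.inl ⟨rfl, hkeep.mp hk⟩
          · rintro (⟨rfl, -⟩ | h)
            · exact Or.inr rfl
            · exact Or.inl h
        · rw [if_neg hk]
          rw [ih_mem]
          constructor
          · exact fun h => Or.inr h
          · rintro (⟨rfl, hc⟩ | h)
            · exact absurd (hkeep.mpr hc) hk
            · exact h
      · -- res is a subsequence of the scanned order
        simp only [pvStep, List.reverse_cons]
        by_cases hk : (decide ((2 : Int) ≤ (pvCnt I).getD (PySem.List.pyGetD I a ((0 : Int), (0 : Int))) 0) ||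
            (match st.2 with
              | none => false
              | some v => decide (v ≤ (PySem.List.pyGetD I a ((0 : Int), (0 : Int))).2))) = true
        · rw [if_pos hk]
          exact ih_sub.append (List.Sublist.refl [a])
        · rw [if_neg hk]
          exact ih_sub.trans (List.sublist_append_left _ _)

-- index x is appended by Source B's scan iff A appends it: x contains some other interval
lemma mem_res_iff (I : List (Int × Int)) (x : Int) :
    x ∈ ((pvOrder I).reverse.foldl (pvStep I) (([] : List Int), (none : Option Int))).1 ↔
      x ∈ pvR I := by
  rw [List.foldl_reverse, (pvLoop I (pvOrder I)).2.2.1 x, mem_pvR]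
  have hperm := pvOrder_perm I
  have hnd := pvOrder_nodup I
  have hpw := pvOrder_pairwise I
  constructor
  · rintro ⟨pre, suf, hdec, hc⟩
    have hxo : x ∈ pvOrder I := by rw [hdec]; simp
    have hxr : x ∈ PySem.List.pyRange 0 (I.length : Int) 1 := hperm.mem_iff.mp hxo
    refine ⟨hxr, ?_⟩
    rcases hc with hcnt | ⟨j, hj, hje⟩
    · -- duplicate interval: some other index carries the same pair
      have h2 : 2 ≤ (PySem.List.pyRange 0 (I.length : Int) 1).countP
          (fun j => decide (PySem.List.pyGetD I j (0, 0) = PySem.List.pyGetD I x (0, 0))) := by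
        rw [← count_eq_countP]; exact_mod_cast hcnt
      obtain ⟨b, hb, hbx, hpb⟩ := (two_le_countP_iff
        (PySem.List.nodup_pyRange_one 0 (I.length : Int)) hxr
        (by simp)).mp h2
      have hbeq : PySem.List.pyGetD I b (0, 0) = PySem.List.pyGetD I x (0, 0) :=
        of_decide_eq_true hpb
      exact ⟨b, hb, hbx, le_of_eq (by rw [hbeq]), ge_of_eq (by rw [hbeq])⟩
    · -- a later interval in order whose end fits: it starts no earlier
      have hjo : j ∈ pvOrder I := by rw [hdec]; simp [List.mem_append, List.mem_cons, hj]
      have hjr : j ∈ PySem.List.pyRange 0 (I.length : Int) 1 := hperm.mem_iff.mp hjo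
      have hxs : x ∉ suf := by
        have := hnd
        rw [hdec] at this
        have h2 := (List.nodup_append.mp this).2.1
        exact (List.nodup_cons.mp h2).1
      have hjx : j ≠ x := fun h => hxs (h ▸ hj)
      have hkey : pvKey I x ≤ pvKey I j := by
        have := hpw
        rw [hdec, List.pairwise_append] at this
        have h2 := this.2.1
        rw [List.pairwise_cons] at h2
        exact h2.1 j hj
      have hs : (PySem.List.pyGetD I x (0, 0)).1 ≤ (PySem.List.pyGetD I j (0, 0)).1 := by
        rw [pvKey, pvKey, Prod.Lex.le_iff] at hkey
        simp only [ofLex_toLex] at hkey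
        rcases hkey with h | ⟨h, -⟩
        · exact le_of_lt h
        · exact le_of_eq h
      exact ⟨j, hjr, hjx, hs, hje⟩
  · rintro ⟨hxr, j, hjr, hjx, hs, he⟩
    have hxo : x ∈ pvOrder I := hperm.mem_iff.mpr hxr
    obtain ⟨pre, suf, hdec⟩ := List.append_of_mem hxo
    refine ⟨pre, suf, hdec, ?_⟩
    by_cases hv : PySem.List.pyGetD I j (0, 0) = PySem.List.pyGetD I x (0, 0)
    · -- x's interval occurs twice in I
      left
      have h2 := (two_le_countP_iff
        (PySem.List.nodup_pyRange_one 0 (I.length : Int)) hxr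
        (p := fun j => decide (PySem.List.pyGetD I j (0, 0) = PySem.List.pyGetD I x (0, 0)))
        (by simp)).mpr ⟨j, hjr, hjx, decide_eq_true hv⟩
      rw [← count_eq_countP] at h2
      exact_mod_cast h2
    · -- a strictly larger key: j sits in x's suffix of order
      right
      have hkey : pvKey I x < pvKey I j := by
        rw [pvKey, pvKey, Prod.Lex.lt_iff]
        simp only [ofLex_toLex]
        rcases lt_or_eq_of_le hs with h | h
        · exact Or.inl h
        · refine Or.inr ⟨h, ?_⟩
          have : (PySem.List.pyGetD I j (0, 0)).2 ≠ (PySem.List.pyGetD I x (0, 0)).2 := by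
            intro he2
            exact hv (Prod.ext h.symm he2)
          omega
      have hjo : j ∈ pvOrder I := hperm.mem_iff.mpr hjr
      rw [hdec] at hjo
      rcases List.mem_append.mp hjo with hjp | hjc
      · -- impossible: pairwise order would force key j ≤ key x
        exfalso
        have := hpw
        rw [hdec, List.pairwise_append] at this
        have hle := this.2.2 j hjp x (by simp)
        exact absurd hle (not_le.mpr hkey)
      · rcases List.mem_cons.mp hjc with rfl | hjs
        · exact absurd rfl hjx
        · exact ⟨j, hjs, he⟩

lemma res_nodup (I : List (Int × Int)) :
    ((pvOrder I).reverse.foldl (pvStep I) (([] : List Int), (none : Option Int))).1.Nodup := by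
  rw [List.foldl_reverse]
  exact (pvLoop I (pvOrder I)).2.2.2.nodup (List.nodup_reverse.mpr (pvOrder_nodup I))

-- ===== VERDICT (by name: the statement is the Claim_ definition above) =====
theorem intersection_brute_spec : Claim_equal_intersection_brute := by
  intro I _
  unfold Spec_intersection_brute
  rw [brute_eq]
  show PySem.List.sorted (PySem.Set.ofList (pvR I)) (fun x => x) false =
    PySem.List.sorted ((pvOrder I).reverse.foldl (pvStep I)
      (([] : List Int), (none : Option Int))).1 (fun x => x) false
  apply PySem.List.sorted_eq_sorted_of_perm
  · exact fun a b h => h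
  · exact (List.perm_ext_iff_of_nodup (PySem.Set.nodup_ofList _) (res_nodup I)).mpr
      (fun x => by rw [PySem.Set.mem_ofList, mem_res_iff])
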